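-- pv_equiv track=rewrite | github.com/chduong/learning | HackerRank/SherlockAndProbability.py | num_valid_pairs
-- ===== SOURCE A (Python) =====
-- def num_valid_pairs(arr, k):
--     total = 0
--     window = 0
--
--     for i in range(len(arr)):
--         if arr[i]:
--             total += window
--             window += 1
--         if i >= k and arr[i-k]:
--             window -= 1
--
--     total *= 2
--
--     total += sum(arr)
--
--     return total
-- ===== SOURCE B (Python) =====
-- def num_valid_pairs(arr, k):
--     # prefix-count table first, then a lookup pass (instead of A's sliding window)
--     P = [0]
--     for x in arr:
--         P.append(P[-1] + (1 if x else 0))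
--     total = 0
--     for i, x in enumerate(arr):
--         if x:
--             total += P[i] - P[max(0, i - k)]
--     return 2 * total + sum(arr)
-- ===== Notes on version B (the rewrite author's own statement) =====
-- stated objective: alternative
-- what changed: B precomputes a prefix-count table of truthy elements and, in a second pass, looks up each window count as a difference of two table entries, instead of A's incrementally maintained sliding-window counter.
import Mathlib
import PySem

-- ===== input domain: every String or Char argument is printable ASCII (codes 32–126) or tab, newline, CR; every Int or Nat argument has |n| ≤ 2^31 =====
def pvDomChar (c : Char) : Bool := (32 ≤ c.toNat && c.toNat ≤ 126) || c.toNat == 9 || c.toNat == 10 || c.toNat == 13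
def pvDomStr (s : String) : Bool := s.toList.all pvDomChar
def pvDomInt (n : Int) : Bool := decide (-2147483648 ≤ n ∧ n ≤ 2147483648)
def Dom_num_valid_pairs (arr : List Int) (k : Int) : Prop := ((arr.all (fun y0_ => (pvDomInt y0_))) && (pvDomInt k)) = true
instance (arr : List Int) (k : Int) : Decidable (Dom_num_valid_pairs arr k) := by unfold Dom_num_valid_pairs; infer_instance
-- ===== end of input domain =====

-- B replaces A's incrementally-maintained sliding-window counter by a prefix-count
-- table built first and read back in a second lookup pass (objective: alternative).

-- ===== PORT A =====
-- literal port of A's loop; `pyGetD … 0` stands for `arr[i-k]`, which raises for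
-- k < 0 on nonempty arr — those inputs are excluded by Pre_ below.
def num_valid_pairs (arr : List Int) (k : Int) : Int :=
  let r := (PySem.List.pyRange 0 (arr.length : Int) 1).foldl
    (fun (tw : Int × Int) i =>
      let tw := if PySem.List.pyGetD arr i 0 ≠ 0 then (tw.1 + tw.2, tw.2 + 1) else tw
      if k ≤ i ∧ PySem.List.pyGetD arr (i - k) 0 ≠ 0 then (tw.1, tw.2 - 1) else tw)
    (0, 0)
  r.1 * 2 + arr.sum

-- ===== PORT B =====
def num_valid_pairs_alt (arr : List Int) (k : Int) : Int :=
  -- P = [0]; for x in arr: P.append(P[-1] + (1 if x else 0))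
  let P := arr.foldl (fun P x => P ++ [PySem.List.pyGetD P (-1) 0 + (if x ≠ 0 then 1 else 0)]) [0]
  -- for i, x in enumerate(arr): if x: total += P[i] - P[max(0, i-k)]
  let total := (PySem.List.enumerate arr 0).foldl
    (fun t p => if p.2 ≠ 0 then
        t + (PySem.List.pyGetD P p.1 0 - PySem.List.pyGetD P (max 0 (p.1 - k)) 0)
      else t) 0
  2 * total + arr.sum

-- ===== PRECONDITION & SPEC =====
-- Pre_ excludes only inputs on which A raises: for k < 0 and nonempty arr the
-- access arr[i-k] walks past the end of the list (IndexError).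
def Pre_num_valid_pairs (arr : List Int) (k : Int) : Prop := 0 ≤ k ∨ arr = []
instance (arr : List Int) (k : Int) : Decidable (Pre_num_valid_pairs arr k) := by
  unfold Pre_num_valid_pairs; infer_instance
def pvWitness_num_valid_pairs : List Int × Int := ([1, 0, 2, 3], 2)

def Spec_num_valid_pairs (arr : List Int) (k : Int) (out : Int) : Prop := out = num_valid_pairs_alt arr k
instance (arr : List Int) (k : Int) (out : Int) : Decidable (Spec_num_valid_pairs arr k out) := by unfold Spec_num_valid_pairs; infer_instance

-- ===== CLAIM (what is proved, stated in full; the proofs are below) =====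
def Claim_equal_num_valid_pairs : Prop := ∀ (arr : List Int) (k : Int), Dom_num_valid_pairs arr k → Pre_num_valid_pairs arr k → Spec_num_valid_pairs arr k (num_valid_pairs arr k)

-- ===== LEMMAS AND PROOFS =====

-- 0/1 truthiness weight
def pvB (x : Int) : Int := if x ≠ 0 then 1 else 0

-- count of truthy elements among the first j entries
def cInt (arr : List Int) (j : Nat) : Int := ((arr.take j).map pvB).sum

-- the common reference value of the pair-count loop
def refSum (arr : List Int) (k : Int) (n : Nat) : Int :=
  ((List.range n).map (fun j =>
    if arr.getD j 0 ≠ 0 then cInt arr j - cInt arr ((j : Int) - k).toNat else 0)).sum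

-- functional form of B's prefix list
def pvAux : List Int → Int → List Int
  | [], _ => []
  | x :: xs, c => (c + pvB x) :: pvAux xs (c + pvB x)

lemma cInt_succ (arr : List Int) (j : Nat) (h : j < arr.length) :
    cInt arr (j + 1) = cInt arr j + pvB (arr.getD j 0) := by
  have hj : j < (arr.map pvB).length := by simpa using h
  simp only [cInt]
  rw [List.map_take, List.map_take, List.sum_take_succ _ _ hj]
  simp [List.getD_eq_getElem?_getD, List.getElem?_eq_getElem h]

lemma pvAux_getD (l : List Int) (c : Int) (j : Nat) (h : j ≤ l.length) :
    (c :: pvAux l c).getD j 0 = c + cInt l j := by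
  induction l generalizing c j with
  | nil =>
    have hj0 : j = 0 := by simpa using h
    subst hj0; simp [cInt]
  | cons x xs ih =>
    cases j with
    | zero => simp [cInt]
    | succ j =>
      have hj : j ≤ xs.length := by simpa using h
      have := ih (c + pvB x) j hj
      simp only [pvAux, List.getD_cons_succ] at *
      rw [this]
      simp [cInt, List.take_succ_cons]
      ring

lemma pvPfold (l : List Int) (acc : List Int) (hne : acc ≠ []) :
    l.foldl (fun P x => P ++ [PySem.List.pyGetD P (-1) 0 + (if x ≠ 0 then 1 else 0)]) acc
      = acc ++ pvAux l (PySem.List.pyGetD acc (-1) 0) := by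
  induction l generalizing acc with
  | nil => simp [pvAux]
  | cons x xs ih =>
    simp only [List.foldl_cons]
    rw [ih _ (by simp)]
    rw [PySem.List.pyGetD_neg_one_append_singleton]
    simp [pvAux, pvB]

lemma pvP_eq (arr : List Int) :
    arr.foldl (fun P x => P ++ [PySem.List.pyGetD P (-1) 0 + (if x ≠ 0 then 1 else 0)]) [0]
      = 0 :: pvAux arr 0 := by
  rw [pvPfold arr [0] (by simp)]
  have h0 : PySem.List.pyGetD ([0] : List Int) (-1) 0 = 0 := by decide
  rw [h0]
  rfl

lemma pvA_loop (arr : List Int) (k : Int) (hk : 0 ≤ k) (n : Nat) (hn : n ≤ arr.length) :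
    (PySem.List.pyRange 0 (n : Int) 1).foldl
      (fun (tw : Int × Int) i =>
        let tw := if PySem.List.pyGetD arr i 0 ≠ 0 then (tw.1 + tw.2, tw.2 + 1) else tw
        if k ≤ i ∧ PySem.List.pyGetD arr (i - k) 0 ≠ 0 then (tw.1, tw.2 - 1) else tw)
      (0, 0)
    = (refSum arr k n, cInt arr n - cInt arr ((n : Int) - k).toNat) := by
  induction n with
  | zero =>
    rw [PySem.List.pyRange_one_eq_nil (by simp)]
    have h1 : ((0 : Int) - k).toNat = 0 := by omega
    have h2 : (-k).toNat = 0 := by omega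
    simp [refSum, cInt, h2]
  | succ n ih =>
    have hn' : n < arr.length := by omega
    have hrange : (PySem.List.pyRange 0 ((n + 1 : Nat) : Int) 1)
        = PySem.List.pyRange 0 (n : Int) 1 ++ [(n : Int)] := by
      have := PySem.List.pyRange_one_succ_right (a := 0) (b := (n : Int)) (by positivity)
      rw [← this]; norm_num
    rw [hrange, List.foldl_append, ih (by omega)]
    simp only [List.foldl_cons, List.foldl_nil]
    have hget : PySem.List.pyGetD arr ((n : Nat) : Int) 0 = arr.getD n 0 :=
      PySem.List.pyGetD_natCast arr n 0
    have hsum : refSum arr k (n + 1) = refSum arr k n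
        + (if arr.getD n 0 ≠ 0 then cInt arr n - cInt arr ((n : Int) - k).toNat else 0) := by
      simp [refSum, List.range_succ]
    have hc : cInt arr (n + 1) = cInt arr n + pvB (arr.getD n 0) := cInt_succ arr n hn'
    by_cases hkn : k ≤ (n : Int)
    · -- the removal branch condition is live; arr[n-k] is in range
      have hnk : ((n : Int) - k) = ((n - k.toNat : Nat) : Int) := by omega
      have hgd : PySem.List.pyGetD arr ((n : Int) - k) 0 = arr.getD (n - k.toNat) 0 := by
        rw [hnk]; exact PySem.List.pyGetD_natCast arr _ 0
      have hlt : n - k.toNat < arr.length := by omega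
      have hclip : (((n : Nat) : Int) - k).toNat = n - k.toNat := by omega
      have hclip1' : (((n : Int) + 1) - k).toNat = (n - k.toNat) + 1 := by omega
      have hcc : cInt arr ((n - k.toNat) + 1)
          = cInt arr (n - k.toNat) + pvB (arr.getD (n - k.toNat) 0) := cInt_succ arr _ hlt
      rw [hget, hgd]
      by_cases h1 : arr[n]?.getD (0 : Int) = 0 <;> by_cases h2 : arr[n - k.toNat]?.getD (0 : Int) = 0 <;>
        simp [h1, h2, hkn, hsum, hclip, hclip1', hc, hcc, pvB,
          List.getD_eq_getElem?_getD, Prod.ext_iff] <;> omega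
    · -- k > n : clip stays 0
      have hclip : (((n : Nat) : Int) - k).toNat = 0 := by omega
      have hclip1' : (((n : Int) + 1) - k).toNat = 0 := by omega
      rw [hget]
      by_cases h1 : arr[n]?.getD (0 : Int) = 0 <;>
        simp [h1, hkn, hsum, hclip, hclip1', hc, pvB,
          List.getD_eq_getElem?_getD, Prod.ext_iff] <;> omega

lemma pvB_loop_aux (arr : List Int) (k : Int) (hk : 0 ≤ k) (n : Nat) (hn : n ≤ arr.length) :
    (List.range n).foldl
      (fun t (m : Nat) => if PySem.List.pyGetD arr (0 + (m : Int)) 0 ≠ 0 then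
          t + (PySem.List.pyGetD (0 :: pvAux arr 0) (0 + (m : Int)) 0
             - PySem.List.pyGetD (0 :: pvAux arr 0) (max 0 ((0 + (m : Int)) - k)) 0)
        else t) 0
    = refSum arr k n := by
  induction n with
  | zero => simp [refSum]
  | succ n ih =>
    rw [List.range_succ, List.foldl_append, ih (by omega)]
    simp only [List.foldl_cons, List.foldl_nil, zero_add]
    have hget : PySem.List.pyGetD arr ((n : Nat) : Int) 0 = arr.getD n 0 :=
      PySem.List.pyGetD_natCast arr n 0
    have hP1 : PySem.List.pyGetD (0 :: pvAux arr 0) ((n : Nat) : Int) 0 = cInt arr n := by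
      rw [PySem.List.pyGetD_natCast]
      have := pvAux_getD arr 0 n (by omega)
      simpa using this
    have hmax : max 0 ((n : Int) - k) = ((((n : Int) - k).toNat : Nat) : Int) := by omega
    have hP2 : PySem.List.pyGetD (0 :: pvAux arr 0) (max 0 ((n : Int) - k)) 0
        = cInt arr ((n : Int) - k).toNat := by
      rw [hmax, PySem.List.pyGetD_natCast]
      have := pvAux_getD arr 0 ((n : Int) - k).toNat (by omega)
      simpa using this
    rw [hget, hP1, hP2]
    simp only [refSum, List.range_succ, List.map_append, List.sum_append,
      List.map_cons, List.map_nil, List.sum_cons, List.sum_nil,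
      List.getD_eq_getElem?_getD]
    split_ifs
    · ring
    · ring

lemma pvB_loop (arr : List Int) (k : Int) (hk : 0 ≤ k) :
    (PySem.List.enumerate arr 0).foldl
      (fun t (p : Int × Int) => if p.2 ≠ 0 then
          t + (PySem.List.pyGetD (0 :: pvAux arr 0) p.1 0
             - PySem.List.pyGetD (0 :: pvAux arr 0) (max 0 (p.1 - k)) 0)
        else t) 0
    = refSum arr k arr.length := by
  rw [PySem.List.enumerate_eq_map_pyRange (d := 0), List.foldl_map]
  rw [show PySem.List.len arr = (arr.length : Int) from PySem.List.len_eq arr]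
  rw [PySem.List.pyRange_one, List.foldl_map]
  have : ((arr.length : Int) - 0).toNat = arr.length := by omega
  rw [this]
  exact pvB_loop_aux arr k hk arr.length le_rfl

lemma pv_empty (k : Int) : num_valid_pairs [] k = num_valid_pairs_alt [] k := by
  simp [num_valid_pairs, num_valid_pairs_alt, PySem.List.pyRange_one_eq_nil (by omega : (0:Int) ≤ 0),
    PySem.List.enumerate]

-- ===== VERDICT (by name: the statement is the Claim_ definition above) =====
theorem num_valid_pairs_spec : Claim_equal_num_valid_pairs := by
  intro arr k _ hpre
  unfold Spec_num_valid_pairs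
  rcases hpre with hk | hnil
  · simp only [num_valid_pairs, num_valid_pairs_alt]
    rw [pvA_loop arr k hk arr.length le_rfl, pvP_eq, pvB_loop arr k hk]
    ring
  · subst hnil; exact (pv_empty k).symm
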